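-- pv_equiv track=rewrite | github.com/lee-wanhee/parallel-generation | datasets_v3.py | compute_parallel_schedule
-- ===== SOURCE A (Python) =====
-- def compute_parallel_schedule(edges, positions):
--     """
--     Compute the optimal parallel generation schedule.
--     Returns list of sets: each set contains positions that can be
--     generated in parallel at that step.
--
--     Step 0: all positions with no dependencies (roots)
--     Step 1: positions whose ALL dependencies were resolved in step 0
--     etc.
--     """
--     # Compute level of each position
--     levels = {}
--     def get_level(pos):
--         if pos in levels:
--             return levels[pos]
--         deps = edges.get(pos, set())
--         if not deps:
--             levels[pos] = 0
--             return 0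
--         lev = max(get_level(dep) for dep in deps) + 1
--         levels[pos] = lev
--         return lev
--
--     for pos in positions:
--         get_level(pos)
--
--     # Group by level
--     max_level = max(levels.values()) if levels else 0
--     schedule = [set() for _ in range(max_level + 1)]
--     for pos, lev in levels.items():
--         schedule[lev].add(pos)
--
--     return schedule
-- ===== SOURCE B (Python) =====
-- def compute_parallel_schedule(edges, positions):
--     """Iterative (explicit-stack) computation of dependency levels,
--     then group positions by level.  Return-value equivalent to the
--     recursive version on acyclic inputs."""
--     levels = {}
--     for root in positions:
--         stack = [root]
--         while stack:
--             node = stack[-1]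
--             if node in levels:
--                 stack.pop()
--                 continue
--             deps = edges.get(node, set())
--             pending = [d for d in deps if d not in levels]
--             if pending:
--                 stack += reversed(pending)
--             else:
--                 lev = 0
--                 for d in deps:
--                     lev = max(lev, levels[d] + 1)
--                 levels[node] = lev
--                 stack.pop()
--
--     max_level = max(levels.values()) if levels else 0
--     schedule = [set() for _ in range(max_level + 1)]
--     for pos, lev in levels.items():
--         schedule[lev].add(pos)
--     return schedule
-- ===== Notes on version B (the rewrite author's own statement) =====
-- stated objective: alternative
-- what changed: A computes dependency levels by recursive memoized DFS (a nested get_level function); B computes the same levels iteratively with an explicit work stack (push unresolved dependencies, resolve a node once all its dependencies have levels), removing the recursion entirely; the final bucketing by level is unchanged. Pre_ excludes exactly the inputs where a position transitively depends on a dependency cycle, on which A raises RecursionError (B's loop does not terminate there).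
import Mathlib
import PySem

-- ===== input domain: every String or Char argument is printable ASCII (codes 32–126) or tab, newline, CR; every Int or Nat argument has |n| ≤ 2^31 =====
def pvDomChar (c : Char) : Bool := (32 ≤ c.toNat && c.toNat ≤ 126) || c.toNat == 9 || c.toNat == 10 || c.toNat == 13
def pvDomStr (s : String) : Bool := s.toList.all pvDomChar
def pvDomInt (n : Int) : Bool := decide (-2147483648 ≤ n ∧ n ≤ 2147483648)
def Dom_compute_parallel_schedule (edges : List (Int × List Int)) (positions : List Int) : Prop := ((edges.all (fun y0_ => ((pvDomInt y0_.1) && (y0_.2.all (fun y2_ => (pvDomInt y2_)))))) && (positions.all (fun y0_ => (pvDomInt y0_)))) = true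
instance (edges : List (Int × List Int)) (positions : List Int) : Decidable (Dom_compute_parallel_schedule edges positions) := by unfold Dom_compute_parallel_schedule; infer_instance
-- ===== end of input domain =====

-- A computes dependency levels by recursive memoized DFS; B computes the same levels with an
-- explicit work stack (no recursion); same bucketing by level.  Equivalence is proved on Pre_:
-- inputs on which no position transitively depends on a dependency cycle (elsewhere A raises
-- RecursionError and B's loop does not terminate).


-- ===== SHARED HELPERS (lines that are literally identical in the two Pythons) =====

-- edges.get(pos, set()) — the dependency set of a node (dict lookup with default)
def pvDepsOf (edges : List (Int × List Int)) (n : Int) : List Int :=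
  (PySem.Dict.get? (PySem.Dict.mk edges) n).getD []

-- schedule[lev].add(pos) — add into the lev-th bucket (lev is always in range when called)
def pvBucketAdd : List (PySem.Set Int) → Nat → Int → List (PySem.Set Int)
  | [], _, _ => []
  | s :: rest, 0, x => PySem.Set.add s x :: rest
  | s :: rest, Nat.succ k, x => s :: pvBucketAdd rest k x

-- the grouping tail both Pythons share verbatim:
--   max_level = max(levels.values()) if levels else 0
--   schedule = [set() for _ in range(max_level + 1)]
--   for pos, lev in levels.items(): schedule[lev].add(pos)
def pvSchedule (levels : PySem.Dict Int Int) : List (List Int) :=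
  let maxLevel : Int :=
    match PySem.List.max? (PySem.Dict.values levels) (fun x => x) with
    | some m => m
    | none => 0
  let schedule : List (PySem.Set Int) := (List.range (maxLevel.toNat + 1)).map (fun _ => PySem.Set.empty)
  (PySem.Dict.items levels).foldl (fun sch p => pvBucketAdd sch p.2.toNat p.1) schedule

-- fuel for port A's recursion (an artifact of porting Python recursion; Python has no fuel):
-- strictly more than the number of peel rounds ever needed (see Pre_ below)
def pvSumDeps (edges : List (Int × List Int)) : Nat :=
  edges.foldl (fun a p => a + p.2.length) 0
def pvFuelA (edges : List (Int × List Int)) (positions : List Int) : Nat :=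
  edges.length + pvSumDeps edges + positions.length + 1

-- ===== PORT A =====
-- get_level(pos): recursive, memoizing into `levels`; `levels` is threaded explicitly,
-- max(get_level(dep) for dep in deps) is the sequential running max maxDepsA.
mutual
def getLevelA (edges : List (Int × List Int)) : Nat → Int → PySem.Dict Int Int → Option (Int × PySem.Dict Int Int)
  | 0, _, _ => none          -- fuel exhausted = Python's RecursionError (excluded by Pre_)
  | f + 1, pos, L =>
    match PySem.Dict.get? L pos with
    | some v => some (v, L)
    | none =>
      match pvDepsOf edges pos with
      | [] => some (0, PySem.Dict.insert L pos 0)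
      | d :: ds =>
        match getLevelA edges f d L with
        | none => none
        | some (v, L1) =>
          match maxDepsA edges f ds v L1 with
          | none => none
          | some (m, L2) => some (m + 1, PySem.Dict.insert L2 pos (m + 1))
  termination_by f _ _ => (f, 0)

def maxDepsA (edges : List (Int × List Int)) : Nat → List Int → Int → PySem.Dict Int Int → Option (Int × PySem.Dict Int Int)
  | _, [], m, L => some (m, L)
  | f, d :: ds, m, L =>
    match getLevelA edges f d L with
    | none => none
    | some (v, L1) => maxDepsA edges f ds (max m v) L1
  termination_by f ds _ _ => (f, ds.length + 1)
end

def compute_parallel_schedule (edges : List (Int × List Int)) (positions : List Int) : List (List Int) :=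
  match positions.foldlM (fun L pos => (getLevelA edges (pvFuelA edges positions) pos L).map (·.2)) PySem.Dict.empty with
  | none => []          -- unreachable under Pre_ (Python raises RecursionError instead)
  | some levels => pvSchedule levels

-- ===== PORT B =====
-- the `while stack:` loop; the stack's TOP is the list HEAD (Python keeps it at the end,
-- and pushes reversed(pending), so pending[0] is on top — here: pending ++ rest)
def pvMaxDeps (edges : List (Int × List Int)) : Nat :=
  edges.foldl (fun a p => max a p.2.length) 0
-- fuel for port B's while-loop (porting artifact); generously above the loop's step count
def pvFuelB (edges : List (Int × List Int)) (positions : List Int) : Nat :=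
  (pvMaxDeps edges + 2) ^ pvFuelA edges positions

def machineB (edges : List (Int × List Int)) : Nat → List Int → PySem.Dict Int Int → Option (PySem.Dict Int Int)
  | _, [], L => some L
  | 0, _ :: _, _ => none       -- fuel exhausted (loop does not terminate; excluded by Pre_)
  | f + 1, node :: rest, L =>
    match PySem.Dict.get? L node with
    | some _ => machineB edges f rest L
    | none =>
      if ((pvDepsOf edges node).filter (fun d => (PySem.Dict.get? L d).isNone)).isEmpty then
        machineB edges f rest
          (PySem.Dict.insert L node
            ((pvDepsOf edges node).foldl (fun m d => max m (PySem.Dict.getD L d 0 + 1)) 0))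
      else
        machineB edges f
          (((pvDepsOf edges node).filter (fun d => (PySem.Dict.get? L d).isNone)) ++ node :: rest) L

def compute_parallel_schedule_alt (edges : List (Int × List Int)) (positions : List Int) : List (List Int) :=
  match positions.foldlM (fun L root => machineB edges (pvFuelB edges positions) [root] L) PySem.Dict.empty with
  | none => []          -- unreachable under Pre_ (Python B loops forever there)
  | some levels => pvSchedule levels

-- ===== PRECONDITION & SPEC =====
-- One peel round deletes every node all of whose dependencies are already deleted.
def pvPeel (edges : List (Int × List Int)) (R : List Int) : List Int :=
  R.filter (fun n => (pvDepsOf edges n).any (fun d => R.contains d))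
def pvPeelIter (edges : List (Int × List Int)) : Nat → List Int → List Int
  | 0, R => R
  | r + 1, R => pvPeel edges (pvPeelIter edges r R)

-- Pre_ excludes exactly the inputs on which A raises (RecursionError): a queried position
-- transitively depending on a dependency cycle, i.e. surviving every source-removal round
-- (the textbook repeated-deletion characterisation of acyclicity of the part A explores).
def Pre_compute_parallel_schedule (edges : List (Int × List Int)) (positions : List Int) : Prop :=
  ∀ p ∈ positions, p ∉ pvPeelIter edges edges.length (edges.map Prod.fst)
instance (edges : List (Int × List Int)) (positions : List Int) : Decidable (Pre_compute_parallel_schedule edges positions) := by unfold Pre_compute_parallel_schedule; infer_instance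

def pvWitness_compute_parallel_schedule : (List (Int × List Int)) × List Int :=
  ([(1, [0]), (2, [0, 1])], [2, 0])

def Spec_compute_parallel_schedule (edges : List (Int × List Int)) (positions : List Int) (out : List (List Int)) : Prop := out = compute_parallel_schedule_alt edges positions
instance (edges : List (Int × List Int)) (positions : List Int) (out : List (List Int)) : Decidable (Spec_compute_parallel_schedule edges positions out) := by unfold Spec_compute_parallel_schedule; infer_instance

-- ===== CLAIM (what is proved, stated in full; the proofs are below) =====
def Claim_equal_compute_parallel_schedule : Prop := ∀ (edges : List (Int × List Int)) (positions : List Int), Dom_compute_parallel_schedule edges positions → Pre_compute_parallel_schedule edges positions → Spec_compute_parallel_schedule edges positions (compute_parallel_schedule edges positions)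

-- ===== LEMMAS AND PROOFS =====

-- all values stored in the levels dict are nonnegative
def pvVOK (L : PySem.Dict Int Int) : Prop :=
  ∀ k x, PySem.Dict.get? L k = some x → 0 ≤ x


-- keys present in L stay present with the same value
def pvPres (L L' : PySem.Dict Int Int) : Prop :=
  ∀ k x, PySem.Dict.get? L k = some x → PySem.Dict.get? L' k = some x

-- ---- step-equation lemmas for the two ports ----

theorem pv_gA_memo (edges : List (Int × List Int)) (f : Nat) (pos : Int) (L : PySem.Dict Int Int)
    (v : Int) (h : PySem.Dict.get? L pos = some v) :
    getLevelA edges (f+1) pos L = some (v, L) := by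
  simp [getLevelA, h]

theorem pv_gA_nodeps (edges : List (Int × List Int)) (f : Nat) (pos : Int) (L : PySem.Dict Int Int)
    (h : PySem.Dict.get? L pos = none) (hd : pvDepsOf edges pos = []) :
    getLevelA edges (f+1) pos L = some (0, PySem.Dict.insert L pos 0) := by
  simp [getLevelA, h, hd]

theorem pv_gA_deps (edges : List (Int × List Int)) (f : Nat) (pos : Int) (L : PySem.Dict Int Int)
    (d : Int) (ds : List Int)
    (h : PySem.Dict.get? L pos = none) (hd : pvDepsOf edges pos = d :: ds) :
    getLevelA edges (f+1) pos L =
      match getLevelA edges f d L with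
      | none => none
      | some (v, L1) =>
        match maxDepsA edges f ds v L1 with
        | none => none
        | some (m, L2) => some (m + 1, PySem.Dict.insert L2 pos (m + 1)) := by
  simp [getLevelA, h, hd]

theorem pv_mA_nil (edges : List (Int × List Int)) (f : Nat) (m : Int) (L : PySem.Dict Int Int) :
    maxDepsA edges f [] m L = some (m, L) := by
  simp [maxDepsA]

theorem pv_mA_cons (edges : List (Int × List Int)) (f : Nat) (d : Int) (ds : List Int)
    (m : Int) (L : PySem.Dict Int Int) :
    maxDepsA edges f (d :: ds) m L =
      match getLevelA edges f d L with
      | none => none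
      | some (v, L1) => maxDepsA edges f ds (max m v) L1 := by
  simp [maxDepsA]

theorem pv_mB_memo (edges : List (Int × List Int)) (f : Nat) (node : Int) (rest : List Int)
    (L : PySem.Dict Int Int) (v : Int) (h : PySem.Dict.get? L node = some v) :
    machineB edges (f+1) (node :: rest) L = machineB edges f rest L := by
  simp [machineB, h]

theorem pv_mB_resolve (edges : List (Int × List Int)) (f : Nat) (node : Int) (rest : List Int)
    (L : PySem.Dict Int Int) (h : PySem.Dict.get? L node = none)
    (he : ((pvDepsOf edges node).filter (fun d => (PySem.Dict.get? L d).isNone)).isEmpty = true) :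
    machineB edges (f+1) (node :: rest) L =
      machineB edges f rest
        (PySem.Dict.insert L node
          ((pvDepsOf edges node).foldl (fun m d => max m (PySem.Dict.getD L d 0 + 1)) 0)) := by
  simp [machineB, h, he]

theorem pv_mB_push (edges : List (Int × List Int)) (f : Nat) (node : Int) (rest : List Int)
    (L : PySem.Dict Int Int) (h : PySem.Dict.get? L node = none)
    (he : ¬ ((pvDepsOf edges node).filter (fun d => (PySem.Dict.get? L d).isNone)).isEmpty = true) :
    machineB edges (f+1) (node :: rest) L =
      machineB edges f (((pvDepsOf edges node).filter (fun d => (PySem.Dict.get? L d).isNone)) ++ node :: rest) L := by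
  simp [machineB, h, he]

-- ---- generic small lemmas ----

theorem pv_machineB_nil (edges : List (Int × List Int)) (g : Nat) (L : PySem.Dict Int Int) :
    machineB edges g [] L = some L := by
  cases g <;> simp [machineB]

theorem pv_mB_mono (edges : List (Int × List Int)) :
    ∀ g s L r, machineB edges g s L = some r → machineB edges (g+1) s L = some r := by
  intro g
  induction g with
  | zero =>
    intro s L r h
    cases s with
    | nil => simpa [machineB] using h
    | cons a t => simp [machineB] at h
  | succ g ih =>
    intro s L r h
    cases s with
    | nil => simpa [machineB] using h
    | cons a t =>
      cases hm : PySem.Dict.get? L a with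
      | some v =>
        rw [pv_mB_memo edges _ _ _ _ _ hm] at h
        rw [pv_mB_memo edges _ _ _ _ _ hm]
        exact ih _ _ _ h
      | none =>
        by_cases he : (((pvDepsOf edges a).filter (fun d => (PySem.Dict.get? L d).isNone)).isEmpty = true)
        · rw [pv_mB_resolve edges _ _ _ _ hm he] at h
          rw [pv_mB_resolve edges _ _ _ _ hm he]
          exact ih _ _ _ h
        · rw [pv_mB_push edges _ _ _ _ hm he] at h
          rw [pv_mB_push edges _ _ _ _ hm he]
          exact ih _ _ _ h

theorem pv_mB_mono_le (edges : List (Int × List Int)) {g g' : Nat} (hle : g ≤ g') :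
    ∀ s L r, machineB edges g s L = some r → machineB edges g' s L = some r := by
  induction hle with
  | refl => intro s L r h; exact h
  | step _ ih => intro s L r h; exact pv_mB_mono edges _ _ _ _ (ih _ _ _ h)

theorem pv_gA_mA_mono (edges : List (Int × List Int)) :
    ∀ f, (∀ pos L r, getLevelA edges f pos L = some r → getLevelA edges (f+1) pos L = some r)
       ∧ (∀ ds m L r, maxDepsA edges f ds m L = some r → maxDepsA edges (f+1) ds m L = some r) := by
  intro f
  induction f with
  | zero =>
    constructor
    · intro pos L r h; simp [getLevelA] at h
    · intro ds m L r h
      cases ds with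
      | nil => simpa [pv_mA_nil] using h
      | cons d t => rw [pv_mA_cons] at h; simp [getLevelA] at h
  | succ f ih =>
    have hP : ∀ pos L r, getLevelA edges (f+1) pos L = some r → getLevelA edges (f+2) pos L = some r := by
      intro pos L r h
      cases hm : PySem.Dict.get? L pos with
      | some v =>
        rw [pv_gA_memo edges _ _ _ _ hm] at h
        rw [pv_gA_memo edges _ _ _ _ hm]
        exact h
      | none =>
        cases hd : pvDepsOf edges pos with
        | nil =>
          rw [pv_gA_nodeps edges _ _ _ hm hd] at h
          rw [pv_gA_nodeps edges _ _ _ hm hd]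
          exact h
        | cons d ds =>
          rw [pv_gA_deps edges _ _ _ _ _ hm hd] at h
          rw [pv_gA_deps edges _ _ _ _ _ hm hd]
          cases hg : getLevelA edges f d L with
          | none => simp [hg] at h
          | some p =>
            obtain ⟨v1, L1⟩ := p
            simp only [hg] at h
            simp only [ih.1 _ _ _ hg]
            cases hmx : maxDepsA edges f ds v1 L1 with
            | none => simp [hmx] at h
            | some q =>
              simp only [hmx] at h
              simp only [ih.2 _ _ _ _ hmx]
              exact h
    refine ⟨hP, ?_⟩
    intro ds
    induction ds with
    | nil => intro m L r h; simpa [pv_mA_nil] using h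
    | cons d t iht =>
      intro m L r h
      rw [pv_mA_cons] at h
      rw [pv_mA_cons]
      cases hg : getLevelA edges (f+1) d L with
      | none => simp [hg] at h
      | some p =>
        obtain ⟨v1, L1⟩ := p
        simp only [hg] at h
        simp only [hP _ _ _ hg]
        exact iht _ _ _ h

theorem pv_gA_mono_le (edges : List (Int × List Int)) {f f' : Nat} (hle : f ≤ f') :
    ∀ pos L r, getLevelA edges f pos L = some r → getLevelA edges f' pos L = some r := by
  induction hle with
  | refl => intro pos L r h; exact h
  | step _ ih => intro pos L r h; exact (pv_gA_mA_mono edges _).1 _ _ _ (ih _ _ _ h)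

-- ---- edges facts ----

theorem pv_get?_mk_mem (edges : List (Int × List Int)) :
    ∀ n v, PySem.Dict.get? (PySem.Dict.mk edges) n = some v → ∃ k, (k, v) ∈ edges := by
  induction edges with
  | nil => intro n v h; simp [PySem.Dict.get?] at h
  | cons p t ih =>
    intro n v h
    rw [show (PySem.Dict.mk (p :: t)) = PySem.Dict.mk ((p.1, p.2) :: t) by simp] at h
    rw [PySem.Dict.get?_mk_cons] at h
    by_cases hk : (p.1 == n) = true
    · rw [if_pos hk] at h
      exact ⟨p.1, by simp [← Option.some_inj.mp h]⟩
    · rw [if_neg hk] at h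
      obtain ⟨k, hkm⟩ := ih n v h
      exact ⟨k, by simp [hkm]⟩

theorem pv_foldl_max_le (l : List (Int × List Int)) :
    ∀ a : Nat, a ≤ l.foldl (fun a p => max a p.2.length) a ∧
      ∀ p ∈ l, p.2.length ≤ l.foldl (fun a p => max a p.2.length) a := by
  induction l with
  | nil => intro a; simp
  | cons q t ih =>
    intro a
    constructor
    · calc a ≤ max a q.2.length := le_max_left _ _
        _ ≤ _ := (ih _).1
    · intro p hp
      rcases List.mem_cons.mp hp with hp | hp
      · subst hp
        calc p.2.length ≤ max a p.2.length := le_max_right _ _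
          _ ≤ _ := (ih _).1
      · exact (ih _).2 p hp

theorem pv_deps_len_le (edges : List (Int × List Int)) (n : Int) :
    (pvDepsOf edges n).length ≤ pvMaxDeps edges := by
  unfold pvDepsOf pvMaxDeps
  cases hg : PySem.Dict.get? (PySem.Dict.mk edges) n with
  | none => simp
  | some v =>
    obtain ⟨k, hk⟩ := pv_get?_mk_mem edges n v hg
    simpa using (pv_foldl_max_le edges 0).2 (k, v) hk

theorem pv_deps_of_not_key (edges : List (Int × List Int)) (n : Int)
    (h : n ∉ edges.map Prod.fst) : pvDepsOf edges n = [] := by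
  unfold pvDepsOf
  have : PySem.Dict.get? (PySem.Dict.mk edges) n = none := by
    induction edges with
    | nil => simp [PySem.Dict.get?]
    | cons p t ih =>
      rw [show (PySem.Dict.mk (p :: t)) = PySem.Dict.mk ((p.1, p.2) :: t) by simp]
      rw [PySem.Dict.get?_mk_cons]
      have h1 : p.1 ≠ n := by
        intro he; exact h (by rw [← he]; exact List.mem_map_of_mem (f := Prod.fst) (List.mem_cons_self ..))
      rw [if_neg (by simpa using h1)]
      exact ih (fun hc => h (by simp at hc ⊢; tauto))
  simp [this]

-- ---- peel facts ----

theorem pv_peelIter_succ_subset (edges : List (Int × List Int)) (r : Nat) (K : List Int) :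
    pvPeelIter edges (r+1) K ⊆ pvPeelIter edges r K := by
  intro x hx
  simp only [pvPeelIter, pvPeel] at hx
  exact (List.mem_filter.mp hx).1

theorem pv_deps_out (edges : List (Int × List Int)) (r : Nat) (K : List Int) (n : Int)
    (h1 : n ∉ pvPeelIter edges (r+1) K) (h2 : n ∈ pvPeelIter edges r K) :
    ∀ d ∈ pvDepsOf edges n, d ∉ pvPeelIter edges r K := by
  intro d hd hmem
  apply h1
  simp only [pvPeelIter, pvPeel, List.mem_filter]
  refine ⟨h2, ?_⟩
  simp only [List.any_eq_true]
  exact ⟨d, hd, by simpa using hmem⟩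


-- ---- value / state invariants and the simulation ----

def pvW (edges : List (Int × List Int)) : Nat := pvMaxDeps edges + 2

def pvR (edges : List (Int × List Int)) (r : Nat) : List Int :=
  pvPeelIter edges r (edges.map Prod.fst)

theorem pv_pres_isSome {L L' : PySem.Dict Int Int} (h : pvPres L L') (k : Int)
    (hs : (PySem.Dict.get? L k).isSome) : (PySem.Dict.get? L' k).isSome := by
  obtain ⟨x, hx⟩ := Option.isSome_iff_exists.mp hs
  rw [h k x hx]; rfl

theorem pv_foldl_max_plus (g : Int → Int) : ∀ (ds : List Int) (c : Int),
    ds.foldl (fun a x => max a (g x + 1)) (c+1) = ds.foldl (fun a x => max a (g x)) c + 1 := by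
  intro ds
  induction ds with
  | nil => intro c; simp
  | cons d t ih =>
    intro c
    simp only [List.foldl_cons]
    rw [max_add_add_right]
    exact ih _

theorem pv_mA_memo (edges : List (Int × List Int)) (f : Nat) :
    ∀ (ds : List Int) (m : Int) (L : PySem.Dict Int Int),
      (∀ d ∈ ds, (PySem.Dict.get? L d).isSome) →
      maxDepsA edges (f+1) ds m L =
        some (ds.foldl (fun a x => max a (PySem.Dict.getD L x 0)) m, L) := by
  intro ds
  induction ds with
  | nil => intro m L _; simp [pv_mA_nil]
  | cons d t ih =>
    intro m L hmem
    obtain ⟨v, hv⟩ := Option.isSome_iff_exists.mp (hmem d (List.mem_cons_self ..))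
    rw [pv_mA_cons]
    simp only [pv_gA_memo edges f d L v hv]
    rw [ih (max m v) L (fun x hx => hmem x (List.mem_cons_of_mem _ hx))]
    simp [PySem.Dict.getD_of_get?_eq_some _ _ hv]

-- the induction payload: everything getLevelA guarantees at peel rank r, including the
-- stack-machine simulation
def pvMainP (edges : List (Int × List Int)) (r : Nat) : Prop :=
  ∀ n, n ∉ pvR edges r → ∀ L, pvVOK L →
  ∃ v L', getLevelA edges (r+1) n L = some (v, L')
    ∧ pvPres L L'
    ∧ PySem.Dict.get? L' n = some v
    ∧ 0 ≤ v
    ∧ pvVOK L'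
    ∧ (∀ k, (PySem.Dict.get? L' k).isSome → (PySem.Dict.get? L k).isSome ∨ k ∉ pvR edges r)
    ∧ (∀ g stack rr, machineB edges g stack L' = some rr →
        machineB edges (pvW edges ^ (r+1) + g) (n :: stack) L = some rr)

theorem pv_mainlist (edges : List (Int × List Int)) (r : Nat) (hm : pvMainP edges r) :
    ∀ ds, (∀ d ∈ ds, d ∉ pvR edges r) → ∀ m L, pvVOK L →
    ∃ m' L', maxDepsA edges (r+1) ds m L = some (m', L')
      ∧ pvPres L L'
      ∧ pvVOK L'
      ∧ (∀ k, (PySem.Dict.get? L' k).isSome → (PySem.Dict.get? L k).isSome ∨ k ∉ pvR edges r)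
      ∧ (∀ x ∈ ds, (PySem.Dict.get? L' x).isSome)
      ∧ m' = ds.foldl (fun a x => max a (PySem.Dict.getD L' x 0)) m
      ∧ m ≤ m'
      ∧ (∀ L₀ : PySem.Dict Int Int, (∀ k, (PySem.Dict.get? L₀ k).isSome → (PySem.Dict.get? L k).isSome) →
          ∀ g stack rr, machineB edges g stack L' = some rr →
            machineB edges (ds.length * pvW edges ^ (r+1) + g)
              (ds.filter (fun x => (PySem.Dict.get? L₀ x).isNone) ++ stack) L = some rr) := by
  intro ds
  induction ds with
  | nil =>
    intro _ m L hvok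
    refine ⟨m, L, by simp [pv_mA_nil], fun k x hx => hx, hvok, fun k hk => Or.inl hk, by simp,
      by simp, le_refl m, ?_⟩
    intro L₀ _ g stack rr hmach
    simpa using hmach
  | cons d t ih =>
    intro hout m L hvok
    obtain ⟨v1, L1, hg1, pres1, hget1, hv1, hvok1, hnew1, hsim1⟩ :=
      hm d (hout d (List.mem_cons_self ..)) L hvok
    obtain ⟨m', L', hmx, pres2, hvok2, hnew2, hsome2, hchar2, hle2, hsim2⟩ :=
      ih (fun x hx => hout x (List.mem_cons_of_mem _ hx)) (max m v1) L1 hvok1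
    have hgetd : PySem.Dict.get? L' d = some v1 := pres2 d v1 hget1
    refine ⟨m', L', ?_, ?_, hvok2, ?_, ?_, ?_, ?_, ?_⟩
    · rw [pv_mA_cons]; simp only [hg1]; exact hmx
    · exact fun k x hx => pres2 k x (pres1 k x hx)
    · intro k hk
      rcases hnew2 k hk with hk1 | hk1
      · rcases hnew1 k hk1 with hk2 | hk2
        · exact Or.inl hk2
        · exact Or.inr hk2
      · exact Or.inr hk1
    · intro x hx
      rcases List.mem_cons.mp hx with hx | hx
      · subst hx; rw [hgetd]; rfl
      · exact hsome2 x hx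
    · rw [hchar2]
      simp only [List.foldl_cons]
      rw [PySem.Dict.getD_of_get?_eq_some _ _ hgetd]
    · exact le_trans (le_max_left _ _) hle2
    · intro L₀ hdom g stack rr hmach
      by_cases hd0 : (PySem.Dict.get? L₀ d).isNone = true
      · -- d is on the machine stack
        rw [List.filter_cons_of_pos (by simpa using hd0)]
        have step2 := hsim2 L₀ (fun k hk => pv_pres_isSome pres1 k (hdom k hk)) g stack rr hmach
        have step1 := hsim1 _ _ _ step2
        have harith : (d :: t).length * pvW edges ^ (r+1) + g
            = pvW edges ^ (r+1) + (t.length * pvW edges ^ (r+1) + g) := by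
          simp [List.length_cons, Nat.succ_mul]; ring
        rw [harith]
        simpa using step1
      · -- d was already resolved before the pending list was built
        rw [List.filter_cons_of_neg (by simpa using hd0)]
        have hsomeL : (PySem.Dict.get? L d).isSome := by
          have : (PySem.Dict.get? L₀ d).isSome := by
            cases h0 : PySem.Dict.get? L₀ d with
            | none => rw [h0] at hd0; simp at hd0
            | some _ => rfl
          exact hdom d this
        obtain ⟨w, hw⟩ := Option.isSome_iff_exists.mp hsomeL
        have : getLevelA edges (r+1) d L = some (w, L) := by
          cases r with
          | zero => exact pv_gA_memo edges 0 d L w hw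
          | succ r' => exact pv_gA_memo edges (r'+1) d L w hw
        rw [hg1] at this
        obtain ⟨hveq, hLeq⟩ : v1 = w ∧ L1 = L := by
          have h1 := Option.some_inj.mp this
          exact ⟨congrArg Prod.fst h1, congrArg Prod.snd h1⟩
        subst hLeq
        have step2 := hsim2 L₀ hdom g stack rr hmach
        refine pv_mB_mono_le edges ?_ _ _ _ step2
        have : t.length * pvW edges ^ (r+1) ≤ (d :: t).length * pvW edges ^ (r+1) := by
          apply Nat.mul_le_mul_right
          simp
        omega


theorem pv_pow_pos (edges : List (Int × List Int)) (k : Nat) : 1 ≤ pvW edges ^ k :=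
  Nat.one_le_pow _ _ (by simp [pvW])

-- the conclusion of pvMainP when the node is already memoized
theorem pv_main_memo (edges : List (Int × List Int)) (r : Nat) (n : Int)
    (L : PySem.Dict Int Int) (v : Int)
    (hgl : PySem.Dict.get? L n = some v) (hvok : pvVOK L) :
    ∃ v' L', getLevelA edges (r+1) n L = some (v', L')
      ∧ pvPres L L'
      ∧ PySem.Dict.get? L' n = some v'
      ∧ 0 ≤ v'
      ∧ pvVOK L'
      ∧ (∀ k, (PySem.Dict.get? L' k).isSome → (PySem.Dict.get? L k).isSome ∨ k ∉ pvR edges r)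
      ∧ (∀ g stack rr, machineB edges g stack L' = some rr →
          machineB edges (pvW edges ^ (r+1) + g) (n :: stack) L = some rr) := by
  refine ⟨v, L, pv_gA_memo edges r n L v hgl, fun k x hx => hx, hgl, hvok n v hgl, hvok,
    fun k hk => Or.inl hk, ?_⟩
  intro g stack rr hmach
  obtain ⟨u, hu⟩ : ∃ u, pvW edges ^ (r+1) + g = u + 1 :=
    ⟨pvW edges ^ (r+1) + g - 1, by have := pv_pow_pos edges (r+1); omega⟩
  rw [hu, pv_mB_memo edges u n stack L v hgl]
  refine pv_mB_mono_le edges ?_ _ _ _ hmach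
  have := pv_pow_pos edges (r+1); omega

-- the conclusion of pvMainP when the node has no dependencies
theorem pv_main_resolve (edges : List (Int × List Int)) (r : Nat) (n : Int)
    (L : PySem.Dict Int Int)
    (hgl : PySem.Dict.get? L n = none) (hd : pvDepsOf edges n = []) (hvok : pvVOK L)
    (hn : n ∉ pvR edges r) :
    ∃ v' L', getLevelA edges (r+1) n L = some (v', L')
      ∧ pvPres L L'
      ∧ PySem.Dict.get? L' n = some v'
      ∧ 0 ≤ v'
      ∧ pvVOK L'
      ∧ (∀ k, (PySem.Dict.get? L' k).isSome → (PySem.Dict.get? L k).isSome ∨ k ∉ pvR edges r)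
      ∧ (∀ g stack rr, machineB edges g stack L' = some rr →
          machineB edges (pvW edges ^ (r+1) + g) (n :: stack) L = some rr) := by
  refine ⟨0, PySem.Dict.insert L n 0, pv_gA_nodeps edges r n L hgl hd, ?_, ?_, le_refl 0, ?_, ?_, ?_⟩
  · intro k x hx
    have hkn : k ≠ n := by intro he; rw [he, hgl] at hx; cases hx
    rw [PySem.Dict.get?_insert, if_neg hkn]; exact hx
  · exact PySem.Dict.get?_insert_self _ _ _
  · intro k x hx
    rw [PySem.Dict.get?_insert] at hx
    by_cases hkn : k = n
    · rw [if_pos hkn] at hx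
      have h0 : (0:Int) = x := Option.some_inj.mp hx
      omega
    · rw [if_neg hkn] at hx; exact hvok k x hx
  · intro k hk
    rw [PySem.Dict.get?_insert] at hk
    by_cases hkn : k = n
    · exact Or.inr (by rw [hkn]; exact hn)
    · rw [if_neg hkn] at hk; exact Or.inl hk
  · intro g stack rr hmach
    obtain ⟨u, hu⟩ : ∃ u, pvW edges ^ (r+1) + g = u + 1 :=
      ⟨pvW edges ^ (r+1) + g - 1, by have := pv_pow_pos edges (r+1); omega⟩
    have hpe : ((pvDepsOf edges n).filter (fun x => (PySem.Dict.get? L x).isNone)).isEmpty = true := by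
      rw [hd]; rfl
    rw [hu, pv_mB_resolve edges u n stack L hgl hpe, hd]
    simp only [List.foldl_nil]
    refine pv_mB_mono_le edges ?_ _ _ _ hmach
    have := pv_pow_pos edges (r+1); omega

theorem pv_main (edges : List (Int × List Int)) : ∀ r, pvMainP edges r := by
  intro r
  induction r with
  | zero =>
    intro n hn L hvok
    cases hgl : PySem.Dict.get? L n with
    | some v => exact pv_main_memo edges 0 n L v hgl hvok
    | none =>
      have hd : pvDepsOf edges n = [] :=
        pv_deps_of_not_key edges n (by simpa [pvR, pvPeelIter] using hn)
      exact pv_main_resolve edges 0 n L hgl hd hvok hn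
  | succ r ih =>
    intro n hn L hvok
    by_cases hr : n ∈ pvR edges r
    case neg =>
      obtain ⟨v, L', hA, hpres, hget, hv, hvok', hnew, hsim⟩ := ih n hr L hvok
      refine ⟨v, L', pv_gA_mono_le edges (by omega) _ _ _ hA, hpres, hget, hv, hvok', ?_, ?_⟩
      · intro k hk
        rcases hnew k hk with h1 | h1
        · exact Or.inl h1
        · exact Or.inr (fun hc => h1 (pv_peelIter_succ_subset edges r _ hc))
      · intro g stack rr hmach
        refine pv_mB_mono_le edges ?_ _ _ _ (hsim g stack rr hmach)
        have h1 := Nat.pow_le_pow_right (show 1 ≤ pvW edges by simp [pvW]) (show r+1 ≤ r+2 by omega)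
        have h2 : pvW edges ^ (r+1+1) = pvW edges ^ (r+2) := by norm_num
        omega
    case pos =>
      have hdeps : ∀ d ∈ pvDepsOf edges n, d ∉ pvR edges r := pv_deps_out edges r _ n hn hr
      cases hgl : PySem.Dict.get? L n with
      | some v => exact pv_main_memo edges (r+1) n L v hgl hvok
      | none =>
        cases hd : pvDepsOf edges n with
        | nil => exact pv_main_resolve edges (r+1) n L hgl hd hvok hn
        | cons d ds =>
          obtain ⟨v1, L1, hg1, pres1, hget1, hv1, hvok1, hnew1, hsim1⟩ :=
            ih d (hdeps d (by rw [hd]; exact List.mem_cons_self ..)) L hvok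
          obtain ⟨m', L2, hmx, pres2, hvok2, hnew2, hsome2, hchar2, hle2, hsim2⟩ :=
            pv_mainlist edges r ih ds
              (fun x hx => hdeps x (by rw [hd]; exact List.mem_cons_of_mem _ hx)) v1 L1 hvok1
          have hAeq : getLevelA edges (r+1+1) n L = some (m'+1, PySem.Dict.insert L2 n (m'+1)) := by
            rw [pv_gA_deps edges (r+1) n L d ds hgl hd]
            simp only [hg1, hmx]
          have hge2 : PySem.Dict.get? L2 d = some v1 := pres2 d v1 hget1
          have hnL1 : PySem.Dict.get? L1 n = none := by
            cases h1 : PySem.Dict.get? L1 n with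
            | none => rfl
            | some w =>
              rcases hnew1 n (by rw [h1]; rfl) with h2 | h2
              · rw [hgl] at h2; cases h2
              · exact absurd hr h2
          have hnL2 : PySem.Dict.get? L2 n = none := by
            cases h1 : PySem.Dict.get? L2 n with
            | none => rfl
            | some w =>
              rcases hnew2 n (by rw [h1]; rfl) with h2 | h2
              · rw [hnL1] at h2; cases h2
              · exact absurd hr h2
          have hlen : ds.length + 1 ≤ pvMaxDeps edges := by
            have := pv_deps_len_le edges n
            rw [hd] at this
            simpa using this
          refine ⟨m'+1, PySem.Dict.insert L2 n (m'+1), hAeq, ?_, ?_, by omega, ?_, ?_, ?_⟩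
          · intro k x hx
            have hkn : k ≠ n := by intro he; rw [he, hgl] at hx; cases hx
            rw [PySem.Dict.get?_insert, if_neg hkn]
            exact pres2 _ _ (pres1 _ _ hx)
          · exact PySem.Dict.get?_insert_self _ _ _
          · intro k x hx
            rw [PySem.Dict.get?_insert] at hx
            by_cases hkn : k = n
            · rw [if_pos hkn] at hx
              have : x = m' + 1 := by exact Option.some_inj.mp hx.symm
              omega
            · rw [if_neg hkn] at hx; exact hvok2 k x hx
          · intro k hk
            rw [PySem.Dict.get?_insert] at hk
            by_cases hkn : k = n
            · exact Or.inr (by rw [hkn]; exact hn)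
            · rw [if_neg hkn] at hk
              rcases hnew2 k hk with h1 | h1
              · rcases hnew1 k h1 with h2 | h2
                · exact Or.inl h2
                · exact Or.inr (fun hc => h2 (pv_peelIter_succ_subset edges r _ hc))
              · exact Or.inr (fun hc => h1 (pv_peelIter_succ_subset edges r _ hc))
          · -- the machine simulation
            intro g stack rr hmach
            have hpow1 := pv_pow_pos edges (r+1)
            have hpow2 := pv_pow_pos edges (r+2)
            by_cases hpe : ((pvDepsOf edges n).filter (fun x => (PySem.Dict.get? L x).isNone)).isEmpty = true
            · -- every dependency already resolved: the machine resolves n in one step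
              have hall : ∀ x ∈ pvDepsOf edges n, (PySem.Dict.get? L x).isSome := by
                intro x hx
                have := List.filter_eq_nil_iff.mp (List.isEmpty_iff.mp hpe) x hx
                cases h1 : PySem.Dict.get? L x with
                | none => rw [h1] at this; simp at this
                | some _ => rfl
              obtain ⟨w, hw⟩ := Option.isSome_iff_exists.mp (hall d (by rw [hd]; exact List.mem_cons_self ..))
              have hmemo : getLevelA edges (r+1) d L = some (w, L) := pv_gA_memo edges r d L w hw
              rw [hg1] at hmemo
              have hveq : v1 = w := congrArg Prod.fst (Option.some_inj.mp hmemo)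
              have hLeq : L1 = L := congrArg Prod.snd (Option.some_inj.mp hmemo)
              subst hLeq
              have hdsall : ∀ x ∈ ds, (PySem.Dict.get? L1 x).isSome := by
                intro x hx; exact hall x (by rw [hd]; exact List.mem_cons_of_mem _ hx)
              have hmemo2 := pv_mA_memo edges r ds v1 L1 hdsall
              rw [hmx] at hmemo2
              have hmeq : m' = ds.foldl (fun a x => max a (PySem.Dict.getD L1 x 0)) v1 :=
                congrArg Prod.fst (Option.some_inj.mp hmemo2)
              have hL2eq : L2 = L1 := congrArg Prod.snd (Option.some_inj.mp hmemo2)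
              subst hL2eq
              obtain ⟨u, hu⟩ : ∃ u, pvW edges ^ (r+2) + g = u + 1 := ⟨pvW edges ^ (r+2) + g - 1, by omega⟩
              rw [hu, pv_mB_resolve edges u n stack L2 hgl hpe]
              have hlev : (pvDepsOf edges n).foldl (fun m x => max m (PySem.Dict.getD L2 x 0 + 1)) 0 = m' + 1 := by
                rw [hd]
                simp only [List.foldl_cons]
                rw [PySem.Dict.getD_of_get?_eq_some _ _ (by rw [← hveq] at hw; exact hw)]
                rw [max_eq_right (by omega), pv_foldl_max_plus]
                rw [← hmeq]
              rw [hlev]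
              refine pv_mB_mono_le edges ?_ _ _ _ hmach
              omega
            · -- push the unresolved dependencies, run them, then resolve n
              have hpend2 : ((pvDepsOf edges n).filter (fun x => (PySem.Dict.get? L2 x).isNone)).isEmpty = true := by
                rw [hd]
                rw [List.isEmpty_iff, List.filter_eq_nil_iff]
                intro x hx
                rcases List.mem_cons.mp hx with hx | hx
                · subst hx; rw [hge2]; simp
                · obtain ⟨w2, hw2⟩ := Option.isSome_iff_exists.mp (hsome2 x hx)
                  rw [hw2]; simp
              have hlev2 : (pvDepsOf edges n).foldl (fun m x => max m (PySem.Dict.getD L2 x 0 + 1)) 0 = m' + 1 := by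
                rw [hd]
                simp only [List.foldl_cons]
                rw [PySem.Dict.getD_of_get?_eq_some _ _ hge2]
                rw [max_eq_right (by omega), pv_foldl_max_plus]
                rw [← hchar2]
              have hstep : machineB edges (g+1) (n :: stack) L2 = some rr := by
                rw [pv_mB_resolve edges g n stack L2 hnL2 hpend2, hlev2]
                exact hmach
              obtain ⟨u, hu⟩ : ∃ u, pvW edges ^ (r+2) + g = u + 1 := ⟨pvW edges ^ (r+2) + g - 1, by omega⟩
              rw [hu, pv_mB_push edges u n stack L hgl hpe]
              have hWe : pvW edges ^ (r+2) = pvMaxDeps edges * pvW edges ^ (r+1) + (pvW edges ^ (r+1) + pvW edges ^ (r+1)) := by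
                have h1 : pvW edges ^ (r+2) = pvW edges ^ (r+1) * pvW edges := pow_succ _ _
                rw [h1]
                simp only [pvW]
                ring
              have hmul : (ds.length + 1) * pvW edges ^ (r+1) ≤ pvMaxDeps edges * pvW edges ^ (r+1) :=
                Nat.mul_le_mul_right _ hlen
              have hexp : (ds.length + 1) * pvW edges ^ (r+1) = ds.length * pvW edges ^ (r+1) + pvW edges ^ (r+1) := by ring
              by_cases hdL : (PySem.Dict.get? L d).isNone = true
              · have hfil : (pvDepsOf edges n).filter (fun x => (PySem.Dict.get? L x).isNone)
                    = d :: ds.filter (fun x => (PySem.Dict.get? L x).isNone) := by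
                  rw [hd, List.filter_cons_of_pos (by simpa using hdL)]
                rw [hfil]
                have s2 := hsim2 L (fun k hk => pv_pres_isSome pres1 k hk) (g+1) (n::stack) rr hstep
                have s1 := hsim1 _ _ _ s2
                refine pv_mB_mono_le edges ?_ _ _ _ (by simpa using s1)
                omega
              · have hsomeL : (PySem.Dict.get? L d).isSome := by
                  cases h1 : PySem.Dict.get? L d with
                  | none => rw [h1] at hdL; simp at hdL
                  | some _ => rfl
                obtain ⟨w, hw⟩ := Option.isSome_iff_exists.mp hsomeL
                have hmemo : getLevelA edges (r+1) d L = some (w, L) := pv_gA_memo edges r d L w hw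
                rw [hg1] at hmemo
                have hLeq : L1 = L := congrArg Prod.snd (Option.some_inj.mp hmemo)
                have hfil : (pvDepsOf edges n).filter (fun x => (PySem.Dict.get? L x).isNone)
                    = ds.filter (fun x => (PySem.Dict.get? L x).isNone) := by
                  rw [hd, List.filter_cons_of_neg (by simpa using hdL)]
                rw [hfil]
                have s2 := hsim2 L (by rw [hLeq]; exact fun k hk => hk) (g+1) (n::stack) rr hstep
                rw [hLeq] at s2
                refine pv_mB_mono_le edges ?_ _ _ _ s2
                omega


theorem pv_roots (edges : List (Int × List Int)) (F FB : Nat)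
    (hF : edges.length + 1 ≤ F) (hFB : pvW edges ^ (edges.length + 1) ≤ FB) :
    ∀ ps, (∀ p ∈ ps, p ∉ pvR edges edges.length) → ∀ L, pvVOK L →
    ∃ Lf, List.foldlM (fun L pos => (getLevelA edges F pos L).map (·.2)) L ps = some Lf
        ∧ List.foldlM (fun L root => machineB edges FB [root] L) L ps = some Lf := by
  intro ps
  induction ps with
  | nil => intro _ L hvok; exact ⟨L, rfl, rfl⟩
  | cons p t ih =>
    intro hps L hvok
    obtain ⟨v, L', hA, _, _, _, hvok', _, hsim⟩ :=
      pv_main edges edges.length p (hps p (List.mem_cons_self ..)) L hvok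
    have hAF : getLevelA edges F p L = some (v, L') := pv_gA_mono_le edges hF _ _ _ hA
    have hBF : machineB edges FB [p] L = some L' := by
      have h0 := hsim 0 [] L' (pv_machineB_nil edges 0 L')
      exact pv_mB_mono_le edges (by omega) _ _ _ h0
    obtain ⟨Lf, hA2, hB2⟩ := ih (fun x hx => hps x (List.mem_cons_of_mem _ hx)) L' hvok'
    refine ⟨Lf, ?_, ?_⟩
    · rw [List.foldlM_cons]
      simp only [hAF, Option.map_some]
      exact hA2
    · rw [List.foldlM_cons]
      simp only [hBF]
      exact hB2


-- ===== VERDICT (by name: the statement is the Claim_ definition above) =====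
theorem compute_parallel_schedule_spec : Claim_equal_compute_parallel_schedule := by
  unfold Claim_equal_compute_parallel_schedule
  intro edges positions _ hpre
  unfold Spec_compute_parallel_schedule
  unfold compute_parallel_schedule compute_parallel_schedule_alt
  have hvok0 : pvVOK PySem.Dict.empty := by
    intro k x hx
    rw [PySem.Dict.get?_empty] at hx
    cases hx
  have hpre' : ∀ p ∈ positions, p ∉ pvR edges edges.length := by
    intro p hp
    exact hpre p hp
  have hF : edges.length + 1 ≤ pvFuelA edges positions := by
    unfold pvFuelA; omega
  have hFB : pvW edges ^ (edges.length + 1) ≤ pvFuelB edges positions := by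
    show pvW edges ^ (edges.length + 1) ≤ (pvMaxDeps edges + 2) ^ pvFuelA edges positions
    exact Nat.pow_le_pow_right (show 1 ≤ pvW edges by simp [pvW]) hF
  obtain ⟨Lf, hA, hB⟩ :=
    pv_roots edges (pvFuelA edges positions) (pvFuelB edges positions) hF hFB
      positions hpre' PySem.Dict.empty hvok0
  rw [hA, hB]
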